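-- pv_equiv track=rewrite | github.com/tukaan/tukaan | tukaan/_layouts.py | _parse_grid_cells
-- ===== SOURCE A (Python) =====
-- def _parse_grid_cells(
--     areas_list: list[list[str]]
-- ) -> dict[str, dict[str, int]]:
--     result: dict[str, dict[str, int | bool]] = {}
--     for row_index, row_list in enumerate(areas_list):
--         for col_index, cell_name in enumerate(row_list):
--             if cell_name is None:
--                 continue
--             if cell_name in result:
--                 if not result[cell_name].get("cols_counted", False):
--                     result[cell_name]["colspan"] = row_list.count(cell_name)
--                     result[cell_name]["cols_counted"] = True
--
--                 if not result[cell_name].get("rows_counted", False):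
--                     result[cell_name]["rowspan"] = sum(
--                         cell_name in item for item in areas_list
--                     )
--                     result[cell_name]["rows_counted"] = True
--             else:
--                 result[cell_name] = {
--                     "row": row_index,
--                     "col": col_index,
--                     "rowspan": 1,
--                     "colspan": 1,
--                 }
--
--     for value in result.values():
--         value.pop("cols_counted", "")
--         value.pop("rows_counted", "")
--
--     return result
-- ===== SOURCE B (Python) =====
-- def _parse_grid_cells(areas_list):
--     result = {}
--     occ = {}       # name -> occurrences seen so far
--     rows_in = {}   # name -> number of rows containing name
--     for ri, row in enumerate(areas_list):
--         row_count = {}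
--         for name in row:
--             if name is not None:
--                 row_count[name] = row_count.get(name, 0) + 1
--         for name in row_count:
--             rows_in[name] = rows_in.get(name, 0) + 1
--         for ci, name in enumerate(row):
--             if name is None:
--                 continue
--             k = occ.get(name, 0)
--             if k == 0:
--                 result[name] = {"row": ri, "col": ci, "rowspan": 1, "colspan": 1}
--             elif k == 1:
--                 result[name]["colspan"] = row_count[name]
--             occ[name] = k + 1
--     for name, value in result.items():
--         if occ[name] >= 2:
--             value["rowspan"] = rows_in[name]
--     return result
-- ===== Notes on version B (the rewrite author's own statement) =====
-- stated objective: faster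
-- what changed: Replaces A's per-occurrence row.count() and whole-grid row-membership sweeps by a single pass that precomputes a per-row counter and maintains per-name occurrence and rows-containing tallies, applying rowspans in one final fix-up pass.
import Mathlib
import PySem

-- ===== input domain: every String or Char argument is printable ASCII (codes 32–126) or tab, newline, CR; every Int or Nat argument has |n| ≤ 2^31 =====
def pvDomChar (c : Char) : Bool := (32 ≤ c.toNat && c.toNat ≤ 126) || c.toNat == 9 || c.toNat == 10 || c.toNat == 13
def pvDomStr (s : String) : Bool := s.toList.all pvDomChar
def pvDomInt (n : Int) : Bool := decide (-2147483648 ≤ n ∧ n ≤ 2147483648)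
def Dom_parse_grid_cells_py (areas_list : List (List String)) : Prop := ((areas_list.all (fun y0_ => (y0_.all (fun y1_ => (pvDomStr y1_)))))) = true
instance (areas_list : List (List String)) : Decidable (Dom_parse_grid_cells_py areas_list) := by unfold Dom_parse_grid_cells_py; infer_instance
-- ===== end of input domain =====

-- B replaces A's repeated row scans (row.count / per-name whole-grid row sweeps) by one pass with
-- per-row counters and a rows-containing tally, applying rowspans in one final fix-up pass.


-- ===== PORT A =====
-- literal transliteration of A; the 'cell_name is None' guard is vacuous for List String and is dropped;
-- the True of the bool|int flags "cols_counted"/"rows_counted" is encoded as the Int 1 (exact: the flags are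
-- only tested for truthiness and popped before returning).
def parse_grid_cells_py (areas_list : List (List String)) : List (String × List (String × Int)) :=
  let result : PySem.Dict String (PySem.Dict String Int) :=
    (PySem.List.enumerate areas_list).foldl (fun result p =>
      (PySem.List.enumerate p.2).foldl (fun result q =>
        if result.contains q.2 then
          let v := result.getD q.2 PySem.Dict.empty
          let v := if (v.getD "cols_counted" 0) == 0 then
              (v.insert "colspan" (PySem.List.count p.2 q.2)).insert "cols_counted" 1
            else v
          let v := if (v.getD "rows_counted" 0) == 0 then
              (v.insert "rowspan"
                (areas_list.foldl (fun s item => s + (if q.2 ∈ item then (1 : Int) else 0)) 0)).insert "rows_counted" 1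
            else v
          result.insert q.2 v
        else
          result.insert q.2 (PySem.Dict.ofList [("row", p.1), ("col", q.1), ("rowspan", 1), ("colspan", 1)])
      ) result) PySem.Dict.empty
  result.items.map (fun kv => (kv.1, ((kv.2.erase "cols_counted").erase "rows_counted").items))

-- ===== PORT B =====
-- transliteration of Source B (None guards vacuous for List String and dropped)
def parse_grid_cells_py_alt (areas_list : List (List String)) : List (String × List (String × Int)) :=
  let st :=
    (PySem.List.enumerate areas_list).foldl (fun st p =>
      let rowCount : PySem.Dict String Int :=
        p.2.foldl (fun d name => d.insert name (d.getD name 0 + 1)) PySem.Dict.empty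
      let rowsIn := rowCount.keys.foldl (fun d name => d.insert name (d.getD name 0 + 1)) st.2
      let ro := (PySem.List.enumerate p.2).foldl (fun ro q =>
        let k := ro.2.getD q.2 0
        let res :=
          if k == 0 then
            ro.1.insert q.2 (PySem.Dict.ofList [("row", p.1), ("col", q.1), ("rowspan", 1), ("colspan", 1)])
          else if k == 1 then
            ro.1.insert q.2 ((ro.1.getD q.2 PySem.Dict.empty).insert "colspan" (rowCount.getD q.2 0))
          else ro.1
        (res, ro.2.insert q.2 (k + 1))) st.1
      (ro, rowsIn))
      (((PySem.Dict.empty : PySem.Dict String (PySem.Dict String Int)),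
        (PySem.Dict.empty : PySem.Dict String Int)),
       (PySem.Dict.empty : PySem.Dict String Int))
  st.1.1.items.map (fun kv =>
    (kv.1,
      (if 2 ≤ st.1.2.getD kv.1 0 then kv.2.insert "rowspan" (st.2.getD kv.1 0) else kv.2).items))

-- ===== PRECONDITION & SPEC =====
def Spec_parse_grid_cells_py (areas_list : List (List String)) (out : List (String × List (String × Int))) : Prop := out = parse_grid_cells_py_alt areas_list
instance (areas_list : List (List String)) (out : List (String × List (String × Int))) : Decidable (Spec_parse_grid_cells_py areas_list out) := by unfold Spec_parse_grid_cells_py; infer_instance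

-- ===== CLAIM (what is proved, stated in full; the proofs are below) =====
def Claim_equal_parse_grid_cells_py : Prop := ∀ (areas_list : List (List String)), Dom_parse_grid_cells_py areas_list → Spec_parse_grid_cells_py areas_list (parse_grid_cells_py areas_list)

-- ===== LEMMAS AND PROOFS =====

-- the per-cell "event" both main loops process: (row index, the row, column index, cell name)
abbrev pvEv := Int × List String × Int × String

def pvEvents (al : List (List String)) : List pvEv :=
  (PySem.List.enumerate al).flatMap (fun p => (PySem.List.enumerate p.2).map (fun q => (p.1, p.2, q.1, q.2)))

def pvRowspan (al : List (List String)) (n : String) : Int :=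
  al.foldl (fun s item => s + (if n ∈ item then (1 : Int) else 0)) 0

def pvStepA (al : List (List String)) (result : PySem.Dict String (PySem.Dict String Int)) (e : pvEv) :
    PySem.Dict String (PySem.Dict String Int) :=
  if result.contains e.2.2.2 then
    result.insert e.2.2.2
      (if ((if ((result.getD e.2.2.2 PySem.Dict.empty).getD "cols_counted" 0 == 0) then
              ((result.getD e.2.2.2 PySem.Dict.empty).insert "colspan" (PySem.List.count e.2.1 e.2.2.2)).insert "cols_counted" 1
            else (result.getD e.2.2.2 PySem.Dict.empty)).getD "rows_counted" 0 == 0) then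
         ((if ((result.getD e.2.2.2 PySem.Dict.empty).getD "cols_counted" 0 == 0) then
              ((result.getD e.2.2.2 PySem.Dict.empty).insert "colspan" (PySem.List.count e.2.1 e.2.2.2)).insert "cols_counted" 1
            else (result.getD e.2.2.2 PySem.Dict.empty)).insert "rowspan" (pvRowspan al e.2.2.2)).insert "rows_counted" 1
       else
         (if ((result.getD e.2.2.2 PySem.Dict.empty).getD "cols_counted" 0 == 0) then
              ((result.getD e.2.2.2 PySem.Dict.empty).insert "colspan" (PySem.List.count e.2.1 e.2.2.2)).insert "cols_counted" 1
            else (result.getD e.2.2.2 PySem.Dict.empty)))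
  else
    result.insert e.2.2.2 (PySem.Dict.ofList [("row", e.1), ("col", e.2.2.1), ("rowspan", 1), ("colspan", 1)])

def pvStepB (st : PySem.Dict String (PySem.Dict String Int) × PySem.Dict String Int) (e : pvEv) :
    PySem.Dict String (PySem.Dict String Int) × PySem.Dict String Int :=
  (if st.2.getD e.2.2.2 0 == 0 then
      st.1.insert e.2.2.2 (PySem.Dict.ofList [("row", e.1), ("col", e.2.2.1), ("rowspan", 1), ("colspan", 1)])
    else if st.2.getD e.2.2.2 0 == 1 then
      st.1.insert e.2.2.2 ((st.1.getD e.2.2.2 PySem.Dict.empty).insert "colspan" ((PySem.Dict.counter e.2.1).getD e.2.2.2 0))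
    else st.1,
   st.2.insert e.2.2.2 (st.2.getD e.2.2.2 0 + 1))

def pvRowsInD (al : List (List String)) : PySem.Dict String Int :=
  (PySem.List.enumerate al).foldl
    (fun d p => (PySem.Dict.counter p.2).keys.foldl (fun d name => d.insert name (d.getD name 0 + 1)) d)
    PySem.Dict.empty

-- canonical inner-dict shapes
def pvEntry1 (r c : Int) : PySem.Dict String Int :=
  PySem.Dict.ofList [("row", r), ("col", c), ("rowspan", 1), ("colspan", 1)]
def pvEntryA (r c R C : Int) : PySem.Dict String Int :=
  PySem.Dict.ofList [("row", r), ("col", c), ("rowspan", R), ("colspan", C), ("cols_counted", 1), ("rows_counted", 1)]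
def pvEntryB (r c C : Int) : PySem.Dict String Int :=
  PySem.Dict.ofList [("row", r), ("col", c), ("rowspan", 1), ("colspan", C)]

-- the invariant relating A's state to B's (result, occ) state
def pvInv (al : List (List String)) (rA rB : PySem.Dict String (PySem.Dict String Int))
    (occ : PySem.Dict String Int) : Prop :=
  rA.keys = rB.keys ∧ rA.keys.Nodup ∧ ∀ n : String,
    (occ.getD n 0 ≤ 0 → occ.getD n 0 = 0 ∧ rA.get? n = none) ∧
    (occ.getD n 0 = 1 → ∃ r c, rA.get? n = some (pvEntry1 r c) ∧ rB.get? n = some (pvEntry1 r c)) ∧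
    (2 ≤ occ.getD n 0 → ∃ r c C, rA.get? n = some (pvEntryA r c (pvRowspan al n) C) ∧ rB.get? n = some (pvEntryB r c C))

theorem pv_foldl_flatMap {α β γ : Type} (l : List α) (g : α → List β) (f : γ → β → γ) (i : γ) :
    (l.flatMap g).foldl f i = l.foldl (fun acc x => (g x).foldl f acc) i := by
  induction l generalizing i with
  | nil => rfl
  | cons a t ih => simp [List.foldl_append, ih]

theorem pvA_eq (al : List (List String)) :
    parse_grid_cells_py al =
      ((pvEvents al).foldl (pvStepA al) PySem.Dict.empty).items.map
        (fun kv => (kv.1, ((kv.2.erase "cols_counted").erase "rows_counted").items)) := by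
  unfold parse_grid_cells_py pvEvents
  rw [pv_foldl_flatMap]
  simp only [List.foldl_map]
  rfl

theorem pv_foldl_pair {α σ₁ σ₂ : Type} (h : σ₁ × σ₂ → α → σ₁ × σ₂) (f : σ₁ → α → σ₁) (g : σ₂ → α → σ₂)
    (hh : ∀ s e, h s e = (f s.1 e, g s.2 e)) : ∀ (l : List α) (s : σ₁ × σ₂),
    l.foldl h s = (l.foldl f s.1, l.foldl g s.2) := by
  intro l
  induction l with
  | nil => intro s; rfl
  | cons a t ih => intro s; simp [ih, hh]

theorem pvB_eq (al : List (List String)) :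
    parse_grid_cells_py_alt al =
      ((pvEvents al).foldl pvStepB (PySem.Dict.empty, PySem.Dict.empty)).1.items.map
        (fun kv => (kv.1,
          (if 2 ≤ ((pvEvents al).foldl pvStepB (PySem.Dict.empty, PySem.Dict.empty)).2.getD kv.1 0 then
              kv.2.insert "rowspan" ((pvRowsInD al).getD kv.1 0)
            else kv.2).items)) := by
  have hsplit := pv_foldl_pair
    (fun (st : (PySem.Dict String (PySem.Dict String Int) × PySem.Dict String Int) × PySem.Dict String Int) p =>
      let rowCount : PySem.Dict String Int :=
        p.2.foldl (fun d name => d.insert name (d.getD name 0 + 1)) PySem.Dict.empty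
      let rowsIn := rowCount.keys.foldl (fun d name => d.insert name (d.getD name 0 + 1)) st.2
      let ro := (PySem.List.enumerate p.2).foldl (fun ro (q : Int × String) =>
        let k := ro.2.getD q.2 0
        let res :=
          if k == 0 then
            ro.1.insert q.2 (PySem.Dict.ofList [("row", p.1), ("col", q.1), ("rowspan", 1), ("colspan", 1)])
          else if k == 1 then
            ro.1.insert q.2 ((ro.1.getD q.2 PySem.Dict.empty).insert "colspan" (rowCount.getD q.2 0))
          else ro.1
        (res, ro.2.insert q.2 (k + 1))) st.1
      (ro, rowsIn))
    (fun s p => (PySem.List.enumerate p.2).foldl (fun ro (q : Int × String) =>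
        let k := ro.2.getD q.2 0
        let res :=
          if k == 0 then
            ro.1.insert q.2 (PySem.Dict.ofList [("row", p.1), ("col", q.1), ("rowspan", 1), ("colspan", 1)])
          else if k == 1 then
            ro.1.insert q.2 ((ro.1.getD q.2 PySem.Dict.empty).insert "colspan"
              ((p.2.foldl (fun d name => d.insert name (d.getD name 0 + 1)) PySem.Dict.empty : PySem.Dict String Int).getD q.2 0))
          else ro.1
        (res, ro.2.insert q.2 (k + 1))) s)
    (fun d p => (p.2.foldl (fun d name => d.insert name (d.getD name 0 + 1)) PySem.Dict.empty : PySem.Dict String Int).keys.foldl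
        (fun d name => d.insert name (d.getD name 0 + 1)) d)
    (fun s e => rfl)
    (PySem.List.enumerate al)
    ((PySem.Dict.empty, PySem.Dict.empty), PySem.Dict.empty)
  unfold parse_grid_cells_py_alt pvEvents pvRowsInD
  rw [hsplit]
  simp only [PySem.Dict.foldl_insert_getD_add_one_eq_counter]
  rw [pv_foldl_flatMap]
  simp only [List.foldl_map]
  rfl

theorem pvRowspan_cons (a : List String) (t : List (List String)) (n : String) :
    pvRowspan (a :: t) n = (if n ∈ a then 1 else 0) + pvRowspan t n := by
  unfold pvRowspan
  rw [List.foldl_cons, PySem.List.foldl_add, PySem.List.foldl_add]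
  omega

theorem pv_count_ofList (a : List String) (n : String) :
    (List.count n (PySem.Set.ofList a) : Int) = if n ∈ a then 1 else 0 := by
  by_cases hm : n ∈ a
  · have h1 : 0 < List.count n (PySem.Set.ofList a) := by
      rw [List.count_pos_iff]
      exact (PySem.Set.mem_ofList a n).mpr hm
    have h2 : List.count n (PySem.Set.ofList a) ≤ 1 :=
      List.nodup_iff_count_le_one.mp (PySem.Set.nodup_ofList a) n
    rw [if_pos hm]
    omega
  · have h3 : List.count n (PySem.Set.ofList a) = 0 := by
      rw [List.count_eq_zero]
      exact fun hc => hm ((PySem.Set.mem_ofList a n).mp hc)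
    rw [if_neg hm, h3]
    rfl

theorem pv_rowsfold (l : List (Int × List String)) (d : PySem.Dict String Int) (n : String) :
    (l.foldl (fun d p => (PySem.Dict.counter p.2).keys.foldl
        (fun d name => d.insert name (d.getD name 0 + 1)) d) d).getD n 0
      = d.getD n 0 + pvRowspan (l.map (·.2)) n := by
  induction l generalizing d with
  | nil => simp [pvRowspan]
  | cons a t ih =>
    rw [List.foldl_cons, ih, PySem.Dict.getD_foldl_insert_add_one, PySem.Dict.keys_counter,
      pv_count_ofList, List.map_cons, pvRowspan_cons]
    omega

theorem pvRowsInD_getD (al : List (List String)) (n : String) :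
    (pvRowsInD al).getD n 0 = pvRowspan al n := by
  unfold pvRowsInD
  rw [pv_rowsfold, PySem.List.map_snd_enumerate]
  simp [PySem.Dict.getD_empty]
theorem pv_insert_get?_self {ν : Type} (d : PySem.Dict String ν) (n : String) (v : ν)
    (h : d.get? n = some v) (hnd : d.keys.Nodup) : d.insert n v = d := by
  apply PySem.Dict.ext
  rw [PySem.Dict.items_insert_of_contains d v
    (by rw [PySem.Dict.contains_eq_isSome_get?, h]; rfl)]
  have hcong : ∀ p ∈ d.items, (if (p.1 == n) = true then (n, v) else p) = p := by
    intro p hp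
    by_cases hc : (p.1 == n) = true
    · have h1 : p.1 = n := by simpa using hc
      have h2 : (p.1, p.2) ∈ d.items := by simpa using hp
      rw [h1] at h2
      have h3 := PySem.Dict.get?_of_mem_items d h2 hnd
      rw [h] at h3
      rw [if_pos hc, Option.some_inj.mp h3, ← h1]
    · simp [hc]
  rw [List.map_congr_left hcong]
  exact List.map_id _

theorem pvE1_cc (r c : Int) : (pvEntry1 r c).getD "cols_counted" 0 = 0 := rfl
theorem pvE1_mid (r c C : Int) :
    (((pvEntry1 r c).insert "colspan" C).insert "cols_counted" 1).getD "rows_counted" 0 = 0 := rfl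
theorem pvE1_chain (r c C R : Int) :
    (((((pvEntry1 r c).insert "colspan" C).insert "cols_counted" 1).insert "rowspan" R).insert "rows_counted" 1)
      = pvEntryA r c R C := rfl
theorem pvEA_cc (r c R C : Int) : (pvEntryA r c R C).getD "cols_counted" 0 = 1 := rfl
theorem pvEA_rc (r c R C : Int) : (pvEntryA r c R C).getD "rows_counted" 0 = 1 := rfl
theorem pvE1_colspan (r c C : Int) : (pvEntry1 r c).insert "colspan" C = pvEntryB r c C := rfl

theorem pvInv_step (al : List (List String)) (e : pvEv) (rA : PySem.Dict String (PySem.Dict String Int))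
    (s : PySem.Dict String (PySem.Dict String Int) × PySem.Dict String Int)
    (h : pvInv al rA s.1 s.2) : pvInv al (pvStepA al rA e) (pvStepB s e).1 (pvStepB s e).2 := by
  obtain ⟨rB, occ⟩ := s
  obtain ⟨hkeys, hnd, hinv⟩ := h
  by_cases h0 : occ.getD e.2.2.2 0 ≤ 0
  · obtain ⟨hz, hAnone⟩ := (hinv e.2.2.2).1 h0
    have hBnone : rB.get? e.2.2.2 = none := by
      rw [PySem.Dict.get?_eq_none_iff_not_mem_keys] at hAnone ⊢
      rw [← hkeys]; exact hAnone
    have hcA : rA.contains e.2.2.2 = false := by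
      rw [PySem.Dict.contains_eq_isSome_get?, hAnone]; rfl
    have hcB : rB.contains e.2.2.2 = false := by
      rw [PySem.Dict.contains_eq_isSome_get?, hBnone]; rfl
    have hnotmem : e.2.2.2 ∉ rA.keys := by
      rw [← PySem.Dict.get?_eq_none_iff_not_mem_keys]; exact hAnone
    have hsA : pvStepA al rA e = rA.insert e.2.2.2 (pvEntry1 e.1 e.2.2.1) := by
      unfold pvStepA
      rw [if_neg (by simp [hcA])]
      rfl
    have hsB1 : (pvStepB (rB, occ) e).1 = rB.insert e.2.2.2 (pvEntry1 e.1 e.2.2.1) := by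
      simp only [pvStepB]
      rw [hz]
      rfl
    have hsB2 : (pvStepB (rB, occ) e).2 = occ.insert e.2.2.2 1 := by
      simp only [pvStepB]
      rw [hz]
      rfl
    rw [hsA, hsB1, hsB2]
    refine ⟨?_, ?_, ?_⟩
    · rw [PySem.Dict.keys_insert_of_not_contains _ _ hcA,
        PySem.Dict.keys_insert_of_not_contains _ _ hcB, hkeys]
    · rw [PySem.Dict.keys_insert_of_not_contains _ _ hcA]
      simp only [List.nodup_append, List.nodup_singleton, true_and]
      refine ⟨hnd, ?_⟩
      intro a ha b hb
      rw [List.mem_singleton] at hb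
      subst hb
      intro hEq
      rw [hEq] at ha
      exact hnotmem ha
    · intro m
      by_cases hm : m = e.2.2.2
      · subst hm
        rw [PySem.Dict.getD_insert, PySem.Dict.get?_insert, PySem.Dict.get?_insert]
        simp only [reduceIte]
        exact ⟨fun hh => absurd hh (by norm_num),
          fun _ => ⟨e.1, e.2.2.1, rfl, rfl⟩,
          fun hh => absurd hh (by norm_num)⟩
      · rw [PySem.Dict.getD_insert, PySem.Dict.get?_insert, PySem.Dict.get?_insert,
          if_neg hm, if_neg hm, if_neg hm]
        exact hinv m
  · by_cases h1 : occ.getD e.2.2.2 0 = 1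
    · obtain ⟨r, c, hA, hB⟩ := (hinv e.2.2.2).2.1 h1
      have hcA : rA.contains e.2.2.2 = true := by
        rw [PySem.Dict.contains_eq_isSome_get?, hA]; rfl
      have hcB : rB.contains e.2.2.2 = true := by
        rw [PySem.Dict.contains_eq_isSome_get?, hB]; rfl
      have hvA : rA.getD e.2.2.2 PySem.Dict.empty = pvEntry1 r c := by
        rw [PySem.Dict.getD_eq_get?_getD, hA]; rfl
      have hvB : rB.getD e.2.2.2 PySem.Dict.empty = pvEntry1 r c := by
        rw [PySem.Dict.getD_eq_get?_getD, hB]; rfl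
      have hC : ((PySem.List.count e.2.1 e.2.2.2 : Nat) : Int) = ((List.count e.2.2.2 e.2.1 : Nat) : Int) := by
        rw [PySem.List.count_eq]
      have hsA : pvStepA al rA e
          = rA.insert e.2.2.2 (pvEntryA r c (pvRowspan al e.2.2.2) (List.count e.2.2.2 e.2.1 : Nat)) := by
        unfold pvStepA
        rw [if_pos hcA, hvA]
        rw [if_pos (by rw [pvE1_cc]; decide : ((pvEntry1 r c).getD "cols_counted" 0 == (0:Int)) = true)]
        rw [if_pos (by rw [pvE1_mid]; decide :
          ((((pvEntry1 r c).insert "colspan" ((PySem.List.count e.2.1 e.2.2.2 : Nat) : Int)).insert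
            "cols_counted" 1).getD "rows_counted" 0 == (0:Int)) = true)]
        rw [hC, pvE1_chain]
      have hb0 : (occ.getD e.2.2.2 0 == (0:Int)) = false := by
        rw [beq_eq_false_iff_ne]; omega
      have hb1 : (occ.getD e.2.2.2 0 == (1:Int)) = true := by
        rw [beq_iff_eq]; exact h1
      have hsB1 : (pvStepB (rB, occ) e).1
          = rB.insert e.2.2.2 (pvEntryB r c (List.count e.2.2.2 e.2.1 : Nat)) := by
        simp only [pvStepB, hb0, hb1, Bool.false_eq_true, if_false, if_true]
        rw [hvB, PySem.Dict.getD_counter, pvE1_colspan]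
      have hsB2 : (pvStepB (rB, occ) e).2 = occ.insert e.2.2.2 2 := by
        simp only [pvStepB]
        rw [h1]
        norm_num
      rw [hsA, hsB1, hsB2]
      refine ⟨?_, ?_, ?_⟩
      · rw [PySem.Dict.keys_insert_of_contains _ _ hcA,
          PySem.Dict.keys_insert_of_contains _ _ hcB, hkeys]
      · rw [PySem.Dict.keys_insert_of_contains _ _ hcA]; exact hnd
      · intro m
        by_cases hm : m = e.2.2.2
        · subst hm
          rw [PySem.Dict.getD_insert, PySem.Dict.get?_insert, PySem.Dict.get?_insert]
          simp only [reduceIte]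
          exact ⟨fun hh => absurd hh (by norm_num),
            fun hh => absurd hh (by norm_num),
            fun _ => ⟨r, c, ((List.count e.2.2.2 e.2.1 : Nat) : Int), rfl, rfl⟩⟩
        · rw [PySem.Dict.getD_insert, PySem.Dict.get?_insert, PySem.Dict.get?_insert,
            if_neg hm, if_neg hm, if_neg hm]
          exact hinv m
    · have h2 : 2 ≤ occ.getD e.2.2.2 0 := by omega
      obtain ⟨r, c, C, hA, hB⟩ := (hinv e.2.2.2).2.2 h2
      have hcA : rA.contains e.2.2.2 = true := by
        rw [PySem.Dict.contains_eq_isSome_get?, hA]; rfl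
      have hvA : rA.getD e.2.2.2 PySem.Dict.empty = pvEntryA r c (pvRowspan al e.2.2.2) C := by
        rw [PySem.Dict.getD_eq_get?_getD, hA]; rfl
      have hf1 : ((pvEntryA r c (pvRowspan al e.2.2.2) C).getD "cols_counted" 0 == (0:Int)) = false := by
        rw [pvEA_cc]; decide
      have hf2 : ((pvEntryA r c (pvRowspan al e.2.2.2) C).getD "rows_counted" 0 == (0:Int)) = false := by
        rw [pvEA_rc]; decide
      have hsA : pvStepA al rA e = rA := by
        unfold pvStepA
        rw [if_pos hcA, hvA]
        simp only [hf1, Bool.false_eq_true, if_false]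
        simp only [hf2, Bool.false_eq_true, if_false]
        exact pv_insert_get?_self rA e.2.2.2 _ hA hnd
      have hb0 : (occ.getD e.2.2.2 0 == (0:Int)) = false := by
        rw [beq_eq_false_iff_ne]; omega
      have hb1 : (occ.getD e.2.2.2 0 == (1:Int)) = false := by
        rw [beq_eq_false_iff_ne]; omega
      have hsB1 : (pvStepB (rB, occ) e).1 = rB := by
        simp only [pvStepB, hb0, hb1, Bool.false_eq_true, if_false]
      have hsB2 : (pvStepB (rB, occ) e).2 = occ.insert e.2.2.2 (occ.getD e.2.2.2 0 + 1) := by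
        simp only [pvStepB]
      rw [hsA, hsB1, hsB2]
      refine ⟨hkeys, hnd, ?_⟩
      intro m
      by_cases hm : m = e.2.2.2
      · subst hm
        rw [PySem.Dict.getD_insert]
        simp only [reduceIte]
        exact ⟨fun hh => absurd hh (by omega),
          fun hh => absurd hh (by omega),
          fun _ => ⟨r, c, C, hA, hB⟩⟩
      · rw [PySem.Dict.getD_insert, if_neg hm]
        exact hinv m

theorem pvInv_foldl (al : List (List String)) (l : List pvEv)
    (rA : PySem.Dict String (PySem.Dict String Int))
    (s : PySem.Dict String (PySem.Dict String Int) × PySem.Dict String Int)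
    (h : pvInv al rA s.1 s.2) :
    pvInv al (l.foldl (pvStepA al) rA) ((l.foldl pvStepB s).1) ((l.foldl pvStepB s).2) := by
  induction l generalizing rA s with
  | nil => exact h
  | cons e t ih => exact ih _ _ (pvInv_step al e rA s h)

theorem pvE1_erase (r c : Int) :
    ((pvEntry1 r c).erase "cols_counted").erase "rows_counted" = pvEntry1 r c := rfl
theorem pvEA_erase_items (r c R C : Int) :
    (((pvEntryA r c R C).erase "cols_counted").erase "rows_counted").items
      = [("row", r), ("col", c), ("rowspan", R), ("colspan", C)] := rfl
theorem pvEB_insert_items (r c R C : Int) :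
    ((pvEntryB r c C).insert "rowspan" R).items
      = [("row", r), ("col", c), ("rowspan", R), ("colspan", C)] := rfl

theorem pvFinal (al : List (List String)) (rA rB : PySem.Dict String (PySem.Dict String Int))
    (occ : PySem.Dict String Int) (h : pvInv al rA rB occ) :
    rA.items.map (fun kv => (kv.1, ((kv.2.erase "cols_counted").erase "rows_counted").items)) =
    rB.items.map (fun kv => (kv.1,
      (if 2 ≤ occ.getD kv.1 0 then kv.2.insert "rowspan" ((pvRowsInD al).getD kv.1 0) else kv.2).items)) := by
  obtain ⟨hkeys, hnd, hinv⟩ := h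
  have hndB : rB.keys.Nodup := by rw [← hkeys]; exact hnd
  rw [PySem.Dict.items_eq_map_keys rA hnd PySem.Dict.empty,
    PySem.Dict.items_eq_map_keys rB hndB PySem.Dict.empty, ← hkeys, List.map_map, List.map_map]
  apply List.map_congr_left
  intro m hm
  simp only [Function.comp]
  have hmem : rA.get? m ≠ none := by
    intro hno
    exact (PySem.Dict.get?_eq_none_iff_not_mem_keys rA m).mp hno hm
  by_cases h0 : occ.getD m 0 ≤ 0
  · exact absurd ((hinv m).1 h0).2 hmem
  · by_cases h1 : occ.getD m 0 = 1
    · obtain ⟨r, c, hA, hB⟩ := (hinv m).2.1 h1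
      have hvA : rA.getD m PySem.Dict.empty = pvEntry1 r c := by
        rw [PySem.Dict.getD_eq_get?_getD, hA]; rfl
      have hvB : rB.getD m PySem.Dict.empty = pvEntry1 r c := by
        rw [PySem.Dict.getD_eq_get?_getD, hB]; rfl
      rw [hvA, hvB, if_neg (by omega), pvE1_erase]
    · have h2 : 2 ≤ occ.getD m 0 := by omega
      obtain ⟨r, c, C, hA, hB⟩ := (hinv m).2.2 h2
      have hvA : rA.getD m PySem.Dict.empty = pvEntryA r c (pvRowspan al m) C := by
        rw [PySem.Dict.getD_eq_get?_getD, hA]; rfl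
      have hvB : rB.getD m PySem.Dict.empty = pvEntryB r c C := by
        rw [PySem.Dict.getD_eq_get?_getD, hB]; rfl
      rw [hvA, hvB, if_pos h2, pvRowsInD_getD, pvEA_erase_items, pvEB_insert_items]

-- ===== VERDICT (by name: the statement is the Claim_ definition above) =====
theorem parse_grid_cells_py_spec : Claim_equal_parse_grid_cells_py := by
  intro al _
  unfold Spec_parse_grid_cells_py
  rw [pvA_eq, pvB_eq]
  exact pvFinal al _ _ _
    (pvInv_foldl al (pvEvents al) PySem.Dict.empty (PySem.Dict.empty, PySem.Dict.empty)
      (by refine ⟨rfl, List.nodup_nil, fun n => ⟨fun _ => ⟨rfl, rfl⟩, fun h => by simp at h, fun h => by simp at h⟩⟩))
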